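-- pv_equiv track=rewrite | github.com/konfiot/tipe | plot_rotation.py | detect_sat
-- ===== SOURCE A (Python) =====
-- def detect_sat(d, std_dev, thres=20):
-- 	count = 0
-- 	c = [0]
-- 	for i in range(1, len(d)):
-- 		if abs(d[i - 1] - d[i]) < std_dev/10:
-- 			count += 1
-- 			if count > thres:
-- 				return True
-- 		else:
-- 			count = 0
-- 	return False
-- ===== SOURCE B (Python) =====
-- from itertools import accumulate
--
--
-- def detect_sat(d, std_dev, thres=20):
--     need = max(thres + 1, 1)
--     pref = list(accumulate((abs(d[i] - d[i + 1]) < std_dev / 10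
--                             for i in range(len(d) - 1)), initial=0))
--     return any(pref[i + need] - pref[i] == need for i in range(len(pref) - need))
-- ===== Notes on version B (the rewrite author's own statement) =====
-- stated objective: alternative
-- what changed: Replaces A's counter-with-reset single pass by a prefix-sum window search: accumulate running counts of the adjacent-closeness booleans (itertools.accumulate), then return whether any window of need = max(thres+1, 1) consecutive ones has count exactly need.
import Mathlib
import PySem

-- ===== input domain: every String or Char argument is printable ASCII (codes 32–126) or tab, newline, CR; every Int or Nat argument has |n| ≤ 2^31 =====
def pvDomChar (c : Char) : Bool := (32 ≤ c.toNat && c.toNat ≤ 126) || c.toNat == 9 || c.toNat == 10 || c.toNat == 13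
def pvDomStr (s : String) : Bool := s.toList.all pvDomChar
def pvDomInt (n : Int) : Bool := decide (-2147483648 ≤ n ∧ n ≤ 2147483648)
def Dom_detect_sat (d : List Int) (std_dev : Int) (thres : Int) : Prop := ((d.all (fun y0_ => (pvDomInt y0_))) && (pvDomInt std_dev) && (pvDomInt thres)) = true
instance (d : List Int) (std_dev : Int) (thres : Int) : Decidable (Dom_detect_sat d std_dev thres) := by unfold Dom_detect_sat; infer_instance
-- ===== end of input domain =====

-- B (see Source B) replaces A's counter-with-reset loop by a prefix-sum window search: it
-- accumulates running counts of the adjacent-closeness booleans (itertools.accumulate) and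
-- asks whether any window of need = max(thres+1, 1) consecutive ones counts exactly need
-- (i.e. is all true). Alternative decomposition, no speed claim. Both ports render Python's float test `abs(x) < std_dev/10` as the integer test
-- `10*|x| < std_dev`, exact on the domain |ints| ≤ 2^31.

-- ===== PORT A =====
-- the loop 'for i in range(1, len(d))' with early return, as recursion over the range list;
-- d[i-1], d[i] via pyGetD (every index the loop visits is in range)
def detectSatGo (d : List Int) (std_dev : Int) (thres : Int) : List Int → Int → Bool
  | [], _ => false
  | i :: rest, count =>
    if 10 * |PySem.List.pyGetD d (i - 1) 0 - PySem.List.pyGetD d i 0| < std_dev then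
      if count + 1 > thres then true
      else detectSatGo d std_dev thres rest (count + 1)
    else detectSatGo d std_dev thres rest 0

def detect_sat (d : List Int) (std_dev : Int) (thres : Int) : Bool :=
  detectSatGo d std_dev thres (PySem.List.pyRange 1 d.length 1) 0

-- ===== PORT B =====
-- close = [abs(d[i] - d[i+1]) < std_dev/10 for i in range(len(d) - 1)]
def closeList (d : List Int) (std_dev : Int) : List Bool :=
  (List.range (d.length - 1)).map (fun i => decide (10 * |d.getD i 0 - d.getD (i+1) 0| < std_dev))

-- need = max(thres+1, 1); pref = accumulate(close, initial=0) (List.scanl);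
-- any(pref[i+need] - pref[i] == need for i in range(len(pref) - need))
def detect_sat_alt (d : List Int) (std_dev : Int) (thres : Int) : Bool :=
  let need := (max (thres + 1) 1).toNat
  let pref := (closeList d std_dev).scanl (fun a b => a + (if b then (1 : Int) else 0)) 0
  (List.range (pref.length - need)).any
    (fun i => decide (pref.getD (i + need) 0 - pref.getD i 0 = (need : Int)))

-- ===== PRECONDITION & SPEC =====
def Spec_detect_sat (d : List Int) (std_dev : Int) (thres : Int) (out : Bool) : Prop := out = detect_sat_alt d std_dev thres
instance (d : List Int) (std_dev : Int) (thres : Int) (out : Bool) : Decidable (Spec_detect_sat d std_dev thres out) := by unfold Spec_detect_sat; infer_instance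

-- ===== CLAIM (what is proved, stated in full; the proofs are below) =====
def Claim_equal_detect_sat : Prop := ∀ (d : List Int) (std_dev : Int) (thres : Int), Dom_detect_sat d std_dev thres → Spec_detect_sat d std_dev thres (detect_sat d std_dev thres)

-- ===== LEMMAS AND PROOFS =====

-- reference scan: A's counter loop expressed over the closeness booleans
def scanB (thres : Int) : List Bool → Int → Bool
  | [], _ => false
  | b :: rest, count =>
    if b then (if count + 1 > thres then true else scanB thres rest (count + 1))
    else scanB thres rest 0

theorem closeList_length (d : List Int) (std_dev : Int) :
    (closeList d std_dev).length = d.length - 1 := by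
  simp [closeList]

theorem closeList_getElem (d : List Int) (std_dev : Int) (j : Nat)
    (hj : j < (closeList d std_dev).length) :
    (closeList d std_dev)[j] =
      decide (10 * |d[j]'(by have := closeList_length d std_dev; omega) -
                    d[j+1]'(by have := closeList_length d std_dev; omega)| < std_dev) := by
  have hl := closeList_length d std_dev
  simp only [closeList, List.getElem_map, List.getElem_range, List.length_map, List.length_range] at hj ⊢
  rw [List.getD_eq_getElem _ _ (by omega), List.getD_eq_getElem _ _ (by omega)]

-- A's loop from index j+1 equals the reference scan on the closeness list from position j
theorem detectSatGo_eq_scanB (d : List Int) (std_dev thres : Int) :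
    ∀ (j : Nat) (count : Int),
      detectSatGo d std_dev thres (PySem.List.pyRange ((j : Int) + 1) d.length 1) count =
        scanB thres ((closeList d std_dev).drop j) count := by
  intro j
  induction hfu : (closeList d std_dev).length - j using Nat.strong_induction_on
    generalizing j with
  | _ fuel ih =>
  intro count
  have hl := closeList_length d std_dev
  by_cases hend : (closeList d std_dev).length ≤ j
  · rw [PySem.List.pyRange_one_eq_nil (by omega), List.drop_eq_nil_of_le hend]
    rfl
  · replace hend : j < (closeList d std_dev).length := by omega
    rw [PySem.List.pyRange_one_cons (by omega),
        List.drop_eq_getElem_cons hend, closeList_getElem d std_dev j hend]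
    have h1 : PySem.List.pyGetD d ((j : Int) + 1 - 1) 0 = d[j]'(by omega) := by
      rw [show (j : Int) + 1 - 1 = ((j : Nat) : Int) by omega,
          PySem.List.pyGetD_natCast]
      exact List.getD_eq_getElem _ _ (by omega)
    have h2 : PySem.List.pyGetD d ((j : Int) + 1) 0 = d[j+1]'(by omega) := by
      rw [show (j : Int) + 1 = ((j + 1 : Nat) : Int) by push_cast; ring,
          PySem.List.pyGetD_natCast]
      exact List.getD_eq_getElem _ _ (by omega)
    have hrec : ((j : Int) + 1 + 1) = ((j + 1 : Nat) : Int) + 1 := by push_cast; ring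
    simp only [detectSatGo, scanB, h1, h2, hrec]
    by_cases hc : 10 * |d[j]'(by omega) - d[j+1]'(by omega)| < std_dev
    · simp only [if_pos hc, decide_eq_true hc, if_pos trivial]
      by_cases hct : count + 1 > thres
      · simp [hct]
      · simp only [if_neg hct]
        rw [ih ((closeList d std_dev).length - (j+1)) (by omega) (j+1) rfl]
    · simp only [if_neg hc, decide_eq_false hc]
      simp only [Bool.false_eq_true, if_false]
      rw [ih ((closeList d std_dev).length - (j+1)) (by omega) (j+1) rfl]

-- the scan returns true iff some window of k > (thres adjusted by the running count) trues exists
theorem scanB_iff_window (thres : Int) :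
    ∀ (l : List Bool) (c : Int), 0 ≤ c →
      (scanB thres l c = true ↔
        ∃ i k : Nat, 1 ≤ k ∧ i + k ≤ l.length ∧
          (∀ j, j < k → l.getD (i + j) false = true) ∧
          thres < (if i = 0 then c + (k : Int) else (k : Int))) := by
  intro l
  induction l with
  | nil =>
    intro c hc
    simp only [scanB, List.length_nil]
    constructor
    · intro h; cases h
    · rintro ⟨i, k, hk, hlen, -, -⟩; omega
  | cons b rest ih =>
    intro c hc
    cases b with
    | false =>
      simp only [scanB, Bool.false_eq_true, if_false]
      rw [ih 0 le_rfl]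
      constructor
      · rintro ⟨i, k, hk, hlen, hall, hlt⟩
        refine ⟨i + 1, k, hk, by simp; omega, ?_, ?_⟩
        · intro j hj
          have : i + 1 + j = (i + j) + 1 := by omega
          rw [this, List.getD_cons_succ]
          exact hall j hj
        · simp only [Nat.add_one_ne_zero, if_false]
          split at hlt <;> [skip; exact hlt]
          · simpa using hlt
      · rintro ⟨i, k, hk, hlen, hall, hlt⟩
        cases i with
        | zero =>
          exfalso
          have := hall 0 (by omega)
          simp at this
        | succ i' =>
          refine ⟨i', k, hk, by simp at hlen; omega, ?_, ?_⟩
          · intro j hj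
            have := hall j hj
            rwa [show i' + 1 + j = (i' + j) + 1 by omega, List.getD_cons_succ] at this
          · simp only [Nat.add_one_ne_zero, if_false] at hlt
            split <;> [simpa using hlt; exact hlt]
    | true =>
      simp only [scanB, if_pos trivial]
      by_cases hct : c + 1 > thres
      · rw [if_pos hct]
        constructor
        · intro _
          exact ⟨0, 1, le_rfl, by simp, by intro j hj; interval_cases j; simp, by simpa using hct⟩
        · intro _; rfl
      · rw [if_neg hct, ih (c + 1) (by omega)]
        constructor
        · rintro ⟨i, k, hk, hlen, hall, hlt⟩
          cases i with
          | zero =>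
            refine ⟨0, k + 1, by omega, by simp at hlen ⊢; omega, ?_, ?_⟩
            · intro j hj
              cases j with
              | zero => simp
              | succ j' =>
                rw [show 0 + (j' + 1) = (0 + j') + 1 by omega, List.getD_cons_succ]
                exact hall j' (by omega)
            · rw [if_pos rfl] at hlt
              rw [if_pos rfl]
              push_cast
              omega
          | succ i' =>
            refine ⟨i' + 2, k, hk, by simp at hlen ⊢; omega, ?_, ?_⟩
            · intro j hj
              rw [show i' + 2 + j = (i' + 1 + j) + 1 by omega, List.getD_cons_succ]
              exact hall j hj
            · simp only [Nat.add_one_ne_zero, if_false] at hlt ⊢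
              exact hlt
        · rintro ⟨i, k, hk, hlen, hall, hlt⟩
          cases i with
          | zero =>
            have hk2 : 2 ≤ k := by
              by_contra hlt2
              have hk1 : k = 1 := by omega
              subst hk1
              rw [if_pos rfl] at hlt
              push_cast at hlt
              omega
            refine ⟨0, k - 1, by omega, by simp at hlen ⊢; omega, ?_, ?_⟩
            · intro j hj
              have := hall (j + 1) (by omega)
              rwa [show 0 + (j + 1) = (0 + j) + 1 by omega, List.getD_cons_succ] at this
            · rw [if_pos rfl] at hlt
              rw [if_pos rfl]
              have hcast : ((k - 1 : Nat) : Int) = (k : Int) - 1 := by omega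
              rw [hcast]
              omega
          | succ i' =>
            refine ⟨i', k, hk, by simp at hlen; omega, ?_, ?_⟩
            · intro j hj
              have := hall j hj
              rwa [show i' + 1 + j = (i' + j) + 1 by omega, List.getD_cons_succ] at this
            · simp only [Nat.add_one_ne_zero, if_false] at hlt
              split
              · omega
              · exact hlt

-- all(close[i:i+k]) over an in-range window, as a pointwise condition
theorem all_take_drop (l : List Bool) (i k : Nat) (h : i + k ≤ l.length) :
    ((l.drop i).take k).all id = true ↔ ∀ j, j < k → l.getD (i + j) false = true := by
  have hlen : ((l.drop i).take k).length = k := by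
    simp; omega
  rw [List.all_eq_true]
  constructor
  · intro hall j hj
    have hmem : ((l.drop i).take k)[j]'(by omega) ∈ (l.drop i).take k :=
      List.getElem_mem _
    have := hall _ hmem
    rw [List.getElem_take, List.getElem_drop] at this
    rw [List.getD_eq_getElem _ _ (by omega)]
    exact this
  · intro hall x hx
    obtain ⟨j, hj, rfl⟩ := List.getElem_of_mem hx
    rw [List.getElem_take, List.getElem_drop]
    have := hall j (by omega)
    rwa [List.getD_eq_getElem _ _ (by omega)] at this

-- prefix sums of the closeness booleans count the trues of the corresponding prefix
theorem scanl_getD_count (l : List Bool) :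
    ∀ (s : Int) (i : Nat), i ≤ l.length →
      (l.scanl (fun a b => a + (if b then (1 : Int) else 0)) s).getD i 0 =
        s + (((l.take i).countP id : Nat) : Int) := by
  induction l with
  | nil =>
    intro s i hi
    have h0 : i = 0 := by simpa using hi
    subst h0
    simp [List.scanl]
  | cons b t ih =>
    intro s i hi
    cases i with
    | zero => simp [List.scanl]
    | succ i' =>
      rw [List.scanl_cons, List.getD_cons_succ, ih _ i' (by simpa using hi)]
      simp only [List.take_succ_cons, List.countP_cons, id]
      cases b <;> push_cast <;> ring

theorem alt_iff (d : List Int) (std_dev thres : Int) :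
    detect_sat_alt d std_dev thres = true ↔
      ∃ i : Nat, i + (max (thres + 1) 1).toNat ≤ (closeList d std_dev).length ∧
        ∀ j, j < (max (thres + 1) 1).toNat →
          (closeList d std_dev).getD (i + j) false = true := by
  set need := (max (thres + 1) 1).toNat with hneed
  set close := closeList d std_dev with hclose
  have key : ∀ i : Nat, i + need ≤ close.length →
      ((close.scanl (fun a b => a + (if b then (1 : Int) else 0)) 0).getD (i + need) 0 -
        (close.scanl (fun a b => a + (if b then (1 : Int) else 0)) 0).getD i 0 = (need : Int)
        ↔ ((close.drop i).take need).all id = true) := by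
    intro i hle
    rw [scanl_getD_count close 0 (i + need) hle, scanl_getD_count close 0 i (by omega),
        List.take_add, List.countP_append]
    have hwl : ((close.drop i).take need).length = need := by simp; omega
    have hcle : ((close.drop i).take need).countP id ≤ need := by
      simpa [hwl] using List.countP_le_length (l := (close.drop i).take need) (p := id)
    constructor
    · intro h
      have hc : ((close.drop i).take need).countP id = need := by omega
      rw [List.all_eq_true]
      intro x hx
      have := (List.countP_eq_length).mp (by rw [hc, hwl])
      simpa using this x hx
    · intro h
      have h1 : ((close.drop i).take need).countP id = ((close.drop i).take need).length :=
        List.countP_eq_length.mpr (fun a ha => by simpa using (List.all_eq_true.mp h) a ha)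
      omega
  simp only [detect_sat_alt, List.any_eq_true, List.mem_range, List.length_scanl,
    decide_eq_true_eq, ← hneed, ← hclose]
  constructor
  · rintro ⟨i, hi, hsum⟩
    have hle : i + need ≤ close.length := by omega
    exact ⟨i, hle, (all_take_drop close i need hle).mp ((key i hle).mp hsum)⟩
  · rintro ⟨i, hle, hall⟩
    exact ⟨i, by omega, (key i hle).mpr ((all_take_drop close i need hle).mpr hall)⟩

-- ===== VERDICT (by name: the statement is the Claim_ definition above) =====
theorem detect_sat_spec : Claim_equal_detect_sat := by
  intro d std_dev thres _
  show detect_sat d std_dev thres = detect_sat_alt d std_dev thres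
  have hA : detect_sat d std_dev thres = scanB thres (closeList d std_dev) 0 := by
    have h := detectSatGo_eq_scanB d std_dev thres 0 0
    simpa using h
  have hneedc : (((max (thres + 1) 1).toNat : Nat) : Int) = max (thres + 1) 1 := by
    have : (1 : Int) ≤ max (thres + 1) 1 := le_max_right _ _
    omega
  rw [hA, Bool.eq_iff_iff, scanB_iff_window thres _ 0 le_rfl, alt_iff]
  constructor
  · rintro ⟨i, k, hk, hlen, hall, hlt⟩
    have hlt' : thres < (k : Int) := by
      split at hlt
      · simpa using hlt
      · exact hlt
    have hneed_le : (max (thres + 1) 1).toNat ≤ k := by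
      have h2 : (1 : Int) ≤ (k : Int) := by exact_mod_cast hk
      omega
    exact ⟨i, by omega, fun j hj => hall j (by omega)⟩
  · rintro ⟨i, hlen, hall⟩
    refine ⟨i, (max (thres + 1) 1).toNat, by omega, hlen, hall, ?_⟩
    have hgt : thres < ((max (thres + 1) 1).toNat : Int) := by
      have : thres + 1 ≤ max (thres + 1) 1 := le_max_left _ _
      omega
    split <;> omega
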